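-- pv_equiv track=rewrite | github.com/salvadoreBE/Pancakes_IA | PancakesProfIterativa.py | pancakes
-- ===== SOURCE A (Python) =====
-- from copy import deepcopy
--
-- def pancakes(stack):
--     """"
--     Función que ordena un stack de pancakes
--     utilizando una búsqueda en profundidad iterativa recursiva
--     """
--     # Definir una función que verifique si el stack está ordenado
--     def ordenado(s):
--         return all(s[i] <= s[i+1] for i in range(len(s)-1))
--
--     # Definir una función que voltee los pancakes desde el inicio hasta la posición k
--     def girar(s, k):
--         return s[:k+1][::-1] + s[k+1:]
--
--     # Definir una función auxiliar que realiza la búsqueda en profundidad iterativa recursiva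
--     def profundidad_iterativa_rec(s, max_d, path):
--         if ordenado(s):
--             return True
--         if max_d == 0:
--             return False
--         for i in range(len(s)):
--             nuevo_stack = girar(s, i)
--             if nuevo_stack not in path:
--                 path.append(nuevo_stack)
--                 if profundidad_iterativa_rec(nuevo_stack, max_d - 1, path):
--                     return True
--                 path.pop()
--         return False
--
--     # Realizar una búsqueda de profundidad iterativa recursiva con una profundidad máxima que aumenta
--     for depth in range(1, len(stack)+1):
--         path = [stack]
--         if profundidad_iterativa_rec(deepcopy(stack), depth, path):
--             return path
-- ===== SOURCE B (Python) =====
-- def pancakes(stack):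
--     """Iterative-deepening DFS pancake sort, rewritten with an explicit frame
--     stack (state path + next-flip-index per depth) instead of recursion."""
--     def ordenado(s):
--         return all(s[i] <= s[i + 1] for i in range(len(s) - 1))
--
--     def girar(s, k):
--         return s[:k + 1][::-1] + s[k + 1:]
--
--     n = len(stack)
--     for limit in range(1, n + 1):
--         if ordenado(stack):
--             return [stack]
--         path = [stack]
--         frames = [0]          # frames[d] = next flip index to try at depth d
--         while frames:
--             i = frames[-1]
--             if i == n:        # this depth exhausted: backtrack
--                 frames.pop()
--                 path.pop()
--                 continue
--             frames[-1] = i + 1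
--             nuevo = girar(path[-1], i)
--             if nuevo in path:
--                 continue
--             if ordenado(nuevo):
--                 path.append(nuevo)
--                 return path
--             if len(frames) < limit:
--                 path.append(nuevo)
--                 frames.append(0)
--     return None
-- ===== Notes on version B (the rewrite author's own statement) =====
-- stated objective: alternative
-- what changed: The recursive depth-limited DFS with a mutated path list is replaced by an explicit iterative machine: a manual stack of frames (one next-flip index per depth) driven by a while loop, backtracking by popping frames instead of unwinding recursion.
import Mathlib
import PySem

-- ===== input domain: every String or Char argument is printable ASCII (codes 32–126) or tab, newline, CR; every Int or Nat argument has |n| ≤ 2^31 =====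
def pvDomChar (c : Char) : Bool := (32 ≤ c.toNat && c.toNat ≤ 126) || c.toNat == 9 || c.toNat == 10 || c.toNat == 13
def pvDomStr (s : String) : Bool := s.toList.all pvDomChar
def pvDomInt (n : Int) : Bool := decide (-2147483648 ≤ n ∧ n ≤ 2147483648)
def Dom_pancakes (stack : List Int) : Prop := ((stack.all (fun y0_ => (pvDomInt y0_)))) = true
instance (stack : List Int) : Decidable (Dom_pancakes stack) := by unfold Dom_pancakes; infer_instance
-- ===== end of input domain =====

-- B replaces A's recursive depth-limited DFS by an explicit frame-stack machine (alternative decomposition, same search order and results).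

-- ===== PORT A =====
-- shared helpers, identical in both Python versions
-- all(s[i] <= s[i+1] for i in range(len(s)-1)); indices are in range, so getD is exact
def ordenado (s : List Int) : Bool :=
  (List.range (s.length - 1)).all (fun i => decide (s.getD i 0 ≤ s.getD (i + 1) 0))

-- s[:k+1][::-1] + s[k+1:]
def girar (s : List Int) (k : Nat) : List Int :=
  (PySem.List.slice s none (some ((k : Int) + 1))).reverse ++ PySem.List.slice s (some ((k : Int) + 1)) none

-- profundidad_iterativa_rec; the mutated 'path' is threaded functionally: 'some p' = return True
-- with path = p, 'none' = return False (path restored by append-then-pop, i.e. unchanged).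
def profRec (maxd : Nat) (s : List Int) (path : List (List Int)) : Option (List (List Int)) :=
  if ordenado s then some path
  else
    match maxd with
    | 0 => none
    | Nat.succ m =>
      (List.range s.length).foldl
        (fun acc i =>
          match acc with
          | some p => some p
          | none =>
            let nuevo := girar s i
            if path.contains nuevo then none
            else profRec m nuevo (path ++ [nuevo]))
        none

def pancakes (stack : List Int) : Option (List (List Int)) :=
  (List.range stack.length).foldl
    (fun acc d =>
      match acc with
      | some p => some p
      | none => profRec (d + 1) stack [stack])
    none

-- ===== PORT B =====
-- The while-loop machine of Source B. The path and frame stacks are kept head-as-top (a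
-- representation choice for Python's append/pop at the end); the returned path is reversed
-- back to Python's order. The fuel argument only makes the loop total: mu (below) bounds
-- the number of iterations, and pancakes_alt supplies more fuel than that bound.
def run (fuel : Nat) (L n : Nat) (pathRev : List (List Int)) (frames : List Nat) :
    Option (List (List Int)) :=
  match fuel with
  | 0 => none
  | Nat.succ fuel =>
    match pathRev, frames with
    | s :: pr, i :: fr =>
      if i = n then run fuel L n pr fr                      -- depth exhausted: backtrack
      else
        let nuevo := girar s i
        if (s :: pr).contains nuevo then run fuel L n (s :: pr) ((i + 1) :: fr)
        else if ordenado nuevo then some ((nuevo :: s :: pr).reverse)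
        else if fr.length + 1 < L then run fuel L n (nuevo :: s :: pr) (0 :: (i + 1) :: fr)
        else run fuel L n (s :: pr) ((i + 1) :: fr)
    | _, _ => none

def pancakes_alt (stack : List Int) : Option (List (List Int)) :=
  let n := stack.length
  (List.range n).foldl
    (fun acc l =>
      match acc with
      | some p => some p
      | none =>
        if ordenado stack then some [stack]
        else run ((n + 1) * (n + 2) ^ (l + 1) + 1) (l + 1) n [stack] [0])
    none

-- ===== PRECONDITION & SPEC =====
def Spec_pancakes (stack : List Int) (out : Option (List (List Int))) : Prop := out = pancakes_alt stack
instance (stack : List Int) (out : Option (List (List Int))) : Decidable (Spec_pancakes stack out) := by unfold Spec_pancakes; infer_instance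

-- ===== CLAIM (what is proved, stated in full; the proofs are below) =====
def Claim_equal_pancakes : Prop := ∀ (stack : List Int), Dom_pancakes stack → Spec_pancakes stack (pancakes stack)

-- ===== LEMMAS AND PROOFS =====

-- the loop body of profRec, as a named function
def body (m : Nat) (path : List (List Int)) (s : List Int) :
    Option (List (List Int)) → Nat → Option (List (List Int)) :=
  fun acc i =>
    match acc with
    | some p => some p
    | none =>
      let nuevo := girar s i
      if path.contains nuevo then none
      else profRec m nuevo (path ++ [nuevo])

-- profRec's loop, resumed from index i
def loopFrom (m : Nat) (path : List (List Int)) (s : List Int) (i : Nat) :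
    Option (List (List Int)) :=
  (List.range' i (s.length - i)).foldl (body m path s) none

-- the recursive-DFS meaning of a machine configuration
def Aeval (L : Nat) : List (List Int) → List Nat → Option (List (List Int))
  | s :: pr, i :: fr =>
    (match loopFrom (L - fr.length - 1) ((s :: pr).reverse) s i with
     | some p => some p
     | none => Aeval L pr fr)
  | _, _ => none

-- termination measure of the machine
def mu (n L : Nat) : List Nat → Nat
  | [] => 0
  | i :: fr => (n + 1 - i) * (n + 2) ^ (L - fr.length) + mu n L fr

lemma body_some (m : Nat) (path : List (List Int)) (s : List Int)
    (p : List (List Int)) (i : Nat) : body m path s (some p) i = some p := rfl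

lemma body_none (m : Nat) (path : List (List Int)) (s : List Int) (i : Nat) :
    body m path s none i =
      (if path.contains (girar s i) then none
       else profRec m (girar s i) (path ++ [girar s i])) := rfl

lemma Aeval_cons (L : Nat) (s : List Int) (pr : List (List Int)) (i : Nat) (fr : List Nat) :
    Aeval L (s :: pr) (i :: fr) =
      (match loopFrom (L - fr.length - 1) ((s :: pr).reverse) s i with
       | some p => some p
       | none => Aeval L pr fr) := rfl

lemma run_succ (fuel L n : Nat) (s : List Int) (pr : List (List Int)) (i : Nat) (fr : List Nat) :
    run (fuel + 1) L n (s :: pr) (i :: fr) =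
      (if i = n then run fuel L n pr fr
       else if (s :: pr).contains (girar s i) then run fuel L n (s :: pr) ((i + 1) :: fr)
       else if ordenado (girar s i) then some (((girar s i) :: s :: pr).reverse)
       else if fr.length + 1 < L then run fuel L n ((girar s i) :: s :: pr) (0 :: (i + 1) :: fr)
       else run fuel L n (s :: pr) ((i + 1) :: fr)) := rfl

lemma girar_eq (s : List Int) (k : Nat) :
    girar s k = (s.take (k + 1)).reverse ++ s.drop (k + 1) := by
  have h1 : ((k : Int) + 1) = ((k + 1 : Nat) : Int) := by push_cast; ring
  rw [girar, h1, PySem.List.slice_to_natCast, PySem.List.slice_from_natCast]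

lemma girar_length (s : List Int) (k : Nat) : (girar s k).length = s.length := by
  rw [girar_eq]
  simp
  omega

lemma foldl_body_some (m : Nat) (path : List (List Int)) (s : List Int)
    (p : List (List Int)) (l : List Nat) :
    l.foldl (body m path s) (some p) = some p := by
  induction l with
  | nil => rfl
  | cons a l ih => simpa [body_some] using ih

lemma profRec_sorted (m : Nat) (s : List Int) (path : List (List Int))
    (h : ordenado s = true) : profRec m s path = some path := by
  cases m <;> simp [profRec, h]

lemma profRec_zero (s : List Int) (path : List (List Int))
    (h : ordenado s = false) : profRec 0 s path = none := by
  simp [profRec, h]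

lemma profRec_succ (m : Nat) (s : List Int) (path : List (List Int))
    (h : ordenado s = false) : profRec (m + 1) s path = loopFrom m path s 0 := by
  rw [profRec.eq_def]
  simp only [h, Bool.false_eq_true, if_false]
  rw [loopFrom, Nat.sub_zero, List.range_eq_range']
  rfl

lemma loopFrom_stop (m : Nat) (path : List (List Int)) (s : List Int) (i : Nat)
    (h : s.length ≤ i) : loopFrom m path s i = none := by
  have : s.length - i = 0 := by omega
  simp [loopFrom, this]

lemma loopFrom_step (m : Nat) (path : List (List Int)) (s : List Int) (i : Nat)
    (h : i < s.length) :
    loopFrom m path s i =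
      (match body m path s none i with
       | some p => some p
       | none => loopFrom m path s (i + 1)) := by
  have h1 : s.length - i = (s.length - (i + 1)) + 1 := by omega
  rw [loopFrom, h1, List.range'_succ, List.foldl_cons]
  cases hb : body m path s none i with
  | none => simp [loopFrom]
  | some p => simp [foldl_body_some]

lemma contains_reverse_eq {α : Type} [BEq α] [LawfulBEq α] (l : List α) (a : α) :
    (l.reverse).contains a = l.contains a := by
  simp only [List.contains_eq_mem, List.mem_reverse]

-- the main simulation lemma: with enough fuel, the machine computes Aeval
lemma run_eq (L n : Nat) :
    ∀ fuel pr fr, mu n L fr < fuel →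
      fr.length = pr.length → fr.length ≤ L →
      (∀ j ∈ fr, j ≤ n) → (∀ x ∈ pr, x.length = n) →
      run fuel L n pr fr = Aeval L pr fr := by
  intro fuel
  induction fuel with
  | zero => intro pr fr hmu; omega
  | succ fuel ih =>
    intro pr fr hmu hlen hdep hidx hst
    cases fr with
    | nil => cases pr <;> simp [run, Aeval]
    | cons i fr =>
      cases pr with
      | nil => simp at hlen
      | cons s pr =>
        have hsn : s.length = n := hst s (by simp)
        have hin : i ≤ n := hidx i (by simp)
        have hfrlen : fr.length = pr.length := by simpa using hlen
        have hpow : 0 < (n + 2) ^ (L - fr.length) := Nat.pow_pos (by omega)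
        rw [run_succ]
        by_cases hi : i = n
        · have hmu' : mu n L fr < fuel := by
            have hh : mu n L (i :: fr) = (n + 1 - i) * (n + 2) ^ (L - fr.length) + mu n L fr := rfl
            have h1 : n + 1 - i = 1 := by omega
            rw [h1, one_mul] at hh
            omega
          rw [if_pos hi,
            ih pr fr hmu' hfrlen (by simp at hdep; omega)
              (fun j hj => hidx j (by simp [hj])) (fun x hx => hst x (by simp [hx]))]
          conv_rhs => rw [Aeval_cons, loopFrom_stop _ _ _ _ (by omega)]
        · have hilt : i < n := by omega
          rw [if_neg hi]
          have hmono : (n + 1 - (i + 1)) * (n + 2) ^ (L - fr.length) + (n + 2) ^ (L - fr.length)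
              ≤ (n + 1 - i) * (n + 2) ^ (L - fr.length) := by
            have h2 : (n + 1 - (i + 1)) + 1 ≤ n + 1 - i := by omega
            calc (n + 1 - (i + 1)) * (n + 2) ^ (L - fr.length) + (n + 2) ^ (L - fr.length)
                = ((n + 1 - (i + 1)) + 1) * (n + 2) ^ (L - fr.length) := by ring
              _ ≤ (n + 1 - i) * (n + 2) ^ (L - fr.length) := Nat.mul_le_mul_right _ h2
          have hmuinc : mu n L ((i + 1) :: fr) < mu n L (i :: fr) := by
            simp only [mu]; omega
          have hincargs : run fuel L n (s :: pr) ((i + 1) :: fr)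
              = Aeval L (s :: pr) ((i + 1) :: fr) :=
            ih (s :: pr) ((i + 1) :: fr) (by omega)
              (by simpa using hlen) (by simpa using hdep)
              (by intro j hj
                  rcases List.mem_cons.1 hj with h | h
                  · omega
                  · exact hidx j (by simp [h]))
              hst
          have hstep := loopFrom_step (L - fr.length - 1) ((s :: pr).reverse) s i (by omega)
          by_cases hmem : (s :: pr).contains (girar s i) = true
          · -- nuevo in path: skip this flip
            have hbody : body (L - fr.length - 1) ((s :: pr).reverse) s none i = none := by
              rw [body_none, contains_reverse_eq, hmem, if_pos rfl]
            rw [hmem, if_pos rfl, hincargs]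
            conv_rhs => rw [Aeval_cons, hstep, hbody]
            rw [Aeval_cons]
          · have hmem' : (s :: pr).contains (girar s i) = false := by
              simpa using hmem
            have hmemrev : ((s :: pr).reverse).contains (girar s i) = false := by
              rw [contains_reverse_eq]; exact hmem'
            have hpath : (s :: pr).reverse ++ [girar s i] = ((girar s i) :: s :: pr).reverse := by
              simp
            rw [hmem']
            simp only [Bool.false_eq_true, if_false]
            by_cases hsorted : ordenado (girar s i) = true
            · -- sorted child: both return the extended path
              have hbody : body (L - fr.length - 1) ((s :: pr).reverse) s none i
                  = some ((s :: pr).reverse ++ [girar s i]) := by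
                rw [body_none, hmemrev]
                simp only [Bool.false_eq_true, if_false]
                exact profRec_sorted _ _ _ hsorted
              rw [hsorted, if_pos rfl]
              conv_rhs => rw [Aeval_cons, hstep, hbody]
              rw [hpath]
            · have hsf : ordenado (girar s i) = false := by simpa using hsorted
              rw [hsf]
              simp only [Bool.false_eq_true, if_false]
              by_cases hpush : fr.length + 1 < L
              · -- push a child frame
                have hm : L - fr.length - 1 = (L - fr.length - 2) + 1 := by omega
                have hbody : body (L - fr.length - 1) ((s :: pr).reverse) s none i
                    = loopFrom (L - fr.length - 2) (((girar s i) :: s :: pr).reverse) (girar s i) 0 := by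
                  rw [body_none, hmemrev]
                  simp only [Bool.false_eq_true, if_false]
                  rw [hm, profRec_succ _ _ _ hsf, hpath]
                have hmupush : mu n L (0 :: (i + 1) :: fr) < mu n L (i :: fr) := by
                  have he : L - fr.length = (L - (fr.length + 1)) + 1 := by omega
                  have hlt : (n + 1) * (n + 2) ^ (L - (fr.length + 1))
                      < (n + 2) ^ (L - fr.length) := by
                    rw [he, pow_succ]
                    have hp : 0 < (n + 2) ^ (L - (fr.length + 1)) := Nat.pow_pos (by omega)
                    calc (n + 1) * (n + 2) ^ (L - (fr.length + 1))
                        = (n + 2) ^ (L - (fr.length + 1)) * (n + 1) := by ring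
                      _ < (n + 2) ^ (L - (fr.length + 1)) * (n + 2) :=
                        (Nat.mul_lt_mul_left hp).mpr (by omega)
                  have e1 : mu n L (0 :: (i + 1) :: fr)
                      = (n + 1 - 0) * (n + 2) ^ (L - (fr.length + 1))
                        + ((n + 1 - (i + 1)) * (n + 2) ^ (L - fr.length) + mu n L fr) := rfl
                  have e2 : mu n L (i :: fr)
                      = (n + 1 - i) * (n + 2) ^ (L - fr.length) + mu n L fr := rfl
                  have e4 : n + 1 - 0 = n + 1 := rfl
                  rw [e1, e2, e4]
                  omega
                have hpushargs : run fuel L n ((girar s i) :: s :: pr) (0 :: (i + 1) :: fr)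
                    = Aeval L ((girar s i) :: s :: pr) (0 :: (i + 1) :: fr) :=
                  ih _ _ (by omega) (by simp [hfrlen])
                    (by simp at hdep ⊢; omega)
                    (by intro j hj
                        rcases List.mem_cons.1 hj with h | h
                        · omega
                        · rcases List.mem_cons.1 h with h' | h'
                          · omega
                          · exact hidx j (by simp [h']))
                    (by intro x hx
                        rcases List.mem_cons.1 hx with h | h
                        · subst h; rw [girar_length, hsn]
                        · exact hst x h)
                have hAevalPush : Aeval L ((girar s i) :: s :: pr) (0 :: (i + 1) :: fr)
                    = (match loopFrom (L - fr.length - 2)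
                          (((girar s i) :: s :: pr).reverse) (girar s i) 0 with
                       | some p => some p
                       | none => Aeval L (s :: pr) ((i + 1) :: fr)) := by
                  rw [Aeval_cons]
                  have h3 : L - ((i + 1) :: fr).length - 1 = L - fr.length - 2 := by
                    simp only [List.length_cons]; omega
                  rw [h3]
                rw [if_pos hpush, hpushargs, hAevalPush]
                conv_rhs => rw [Aeval_cons, hstep, hbody]
                cases hlf : loopFrom (L - fr.length - 2)
                    (((girar s i) :: s :: pr).reverse) (girar s i) 0 with
                | some p => rfl
                | none => rfl
              · -- child at the depth limit: skip (A recurses with max_d = 0 and fails)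
                have hm0 : L - fr.length - 1 = 0 := by omega
                have hbody : body (L - fr.length - 1) ((s :: pr).reverse) s none i = none := by
                  rw [body_none, hmemrev]
                  simp only [Bool.false_eq_true, if_false]
                  rw [hm0]
                  exact profRec_zero _ _ hsf
                rw [if_neg hpush, hincargs]
                conv_rhs => rw [Aeval_cons, hstep, hbody]
                rw [Aeval_cons]

-- per depth limit, A's recursive search equals B's machine
lemma limit_eq (stack : List Int) (l : Nat) :
    profRec (l + 1) stack [stack] =
      (if ordenado stack then some [stack]
       else run ((stack.length + 1) * (stack.length + 2) ^ (l + 1) + 1) (l + 1)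
              stack.length [stack] [0]) := by
  by_cases h : ordenado stack = true
  · rw [profRec_sorted _ _ _ h, if_pos h]
  · have hf : ordenado stack = false := by simpa using h
    rw [if_neg h, profRec_succ _ _ _ hf]
    rw [run_eq (l + 1) stack.length _ [stack] [0]
        (by simp [mu]) (by simp) (by simp) (by simp) (by simp)]
    rw [Aeval_cons]
    simp only [List.length_nil, Nat.sub_zero, List.reverse_cons, List.reverse_nil,
      List.nil_append, Nat.add_sub_cancel]
    cases hlf : loopFrom l [stack] stack 0 <;> simp [Aeval]


-- ===== VERDICT (by name: the statement is the Claim_ definition above) =====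
theorem pancakes_spec : Claim_equal_pancakes := by
  intro stack _
  unfold Spec_pancakes pancakes pancakes_alt
  have key : ∀ (L : List Nat) (acc : Option (List (List Int))),
      L.foldl (fun acc d => match acc with
        | some p => some p
        | none => profRec (d + 1) stack [stack]) acc
      = L.foldl (fun acc l => match acc with
        | some p => some p
        | none =>
          if ordenado stack then some [stack]
          else run ((stack.length + 1) * (stack.length + 2) ^ (l + 1) + 1) (l + 1)
                 stack.length [stack] [0]) acc := by
    intro L
    induction L with
    | nil => intro acc; rfl
    | cons d L ih =>
      intro acc
      simp only [List.foldl_cons]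
      cases acc with
      | some p => exact ih _
      | none => rw [limit_eq]; exact ih _
  exact key _ none
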